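-- pv_equiv track=rewrite | github.com/k22900/python | 프로그래머스/0/181890. 왼쪽 오른쪽/왼쪽 오른쪽.py | solution
-- ===== SOURCE A (Python) =====
-- def solution(str_list):
--     answer=[]
--     for idx,val in enumerate(str_list):
--         if val=="l":#"l"을 만나면은 "l"을 기준으로 앞쪽을 리스트 슬라이싱해서 answer을 초기화한다
--             answer = str_list[:idx]
--             break
--
--
--         elif val=="r":#"r"을 만나면은 "r"을 기준으로 뒤쪽을 리스트 슬라이싱을 해서 answer을 초기화한다
--             answer = str_list[idx+1:]
--             break
--
--     return answer
-- ===== SOURCE B (Python) =====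
-- def solution(str_list):
--     n = len(str_list)
--     li = str_list.index("l") if "l" in str_list else n
--     ri = str_list.index("r") if "r" in str_list else n
--     if li < ri:
--         return str_list[:li]
--     if ri < n:
--         return str_list[ri + 1:]
--     return []
-- ===== Notes on version B (the rewrite author's own statement) =====
-- stated objective: alternative
-- what changed: B replaces A's single enumerate-scan-with-break by two independent first-index lookups for 'l' and 'r' plus a positional comparison deciding which slice to return.
import Mathlib
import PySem

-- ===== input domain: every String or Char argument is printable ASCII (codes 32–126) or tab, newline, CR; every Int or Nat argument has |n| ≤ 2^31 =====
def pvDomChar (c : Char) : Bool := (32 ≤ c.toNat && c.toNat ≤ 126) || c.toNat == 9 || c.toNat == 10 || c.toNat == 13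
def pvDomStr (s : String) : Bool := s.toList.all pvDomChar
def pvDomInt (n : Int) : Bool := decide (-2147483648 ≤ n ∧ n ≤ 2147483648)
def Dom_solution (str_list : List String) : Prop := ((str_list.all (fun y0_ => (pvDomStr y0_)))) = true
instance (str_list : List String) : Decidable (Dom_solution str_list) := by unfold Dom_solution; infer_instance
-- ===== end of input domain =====

-- B replaces A's single scan-with-break by two first-index lookups plus a positional comparison (alternative decomposition).

-- ===== PORT A =====
-- the for-loop over enumerate(str_list) with break; falling off the loop returns the initial []
def solutionLoop (str_list : List String) : List (Int × String) → List String
  | [] => []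
  | (idx, val) :: rest =>
    if val = "l" then PySem.List.slice str_list none (some idx)
    else if val = "r" then PySem.List.slice str_list (some (idx + 1)) none
    else solutionLoop str_list rest

def solution (str_list : List String) : List String :=
  solutionLoop str_list (PySem.List.enumerate str_list 0)

-- ===== PORT B =====
def solution_alt (str_list : List String) : List String :=
  let n := str_list.length
  let li := match PySem.List.index? str_list "l" with | some i => i | none => n
  let ri := match PySem.List.index? str_list "r" with | some i => i | none => n
  if li < ri then PySem.List.slice str_list none (some (li : Int))
  else if ri < n then PySem.List.slice str_list (some ((ri : Int) + 1)) none
  else []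

-- ===== PRECONDITION & SPEC =====
def Spec_solution (str_list : List String) (out : List String) : Prop := out = solution_alt str_list
instance (str_list : List String) (out : List String) : Decidable (Spec_solution str_list out) := by unfold Spec_solution; infer_instance

-- ===== CLAIM (what is proved, stated in full; the proofs are below) =====
def Claim_equal_solution : Prop := ∀ (str_list : List String), Dom_solution str_list → Spec_solution str_list (solution str_list)

-- ===== LEMMAS AND PROOFS =====

-- first index of v in pre ++ v :: rest when v ∉ pre
theorem index?_prefix_self (pre rest : List String) (v : String) (h : v ∉ pre) :
    PySem.List.index? (pre ++ v :: rest) v = some pre.length :=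
  (PySem.List.index?_eq_some_iff _ _ _).mpr ⟨pre, rest, rfl, rfl, h⟩

-- any other marker occurring in pre ++ u :: rest (u ≠ v, v ∉ pre) sits strictly after pre
theorem index?_gt_of_ne (pre rest : List String) (u v : String) (hpre : v ∉ pre) (hu : u ≠ v)
    (k : ℕ) (hk : PySem.List.index? (pre ++ u :: rest) v = some k) : pre.length < k := by
  obtain ⟨hlt, hget, _⟩ := PySem.List.getElem_of_index?_eq_some hk
  by_contra hle
  push Not at hle
  rcases lt_or_eq_of_le hle with hlt' | heq
  · apply hpre
    have : (pre ++ u :: rest)[k] = pre[k]'hlt' := List.getElem_append_left hlt'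
    rw [this] at hget
    exact hget ▸ List.getElem_mem _
  · subst heq
    have : (pre ++ u :: rest)[pre.length]'hlt = u := by
      simp
    rw [this] at hget
    exact hu hget

theorem loop_eq_alt (suf : List String) : ∀ (pre : List String),
    "l" ∉ pre → "r" ∉ pre →
    solutionLoop (pre ++ suf) (PySem.List.enumerate suf (pre.length : Int)) =
    solution_alt (pre ++ suf) := by
  induction suf with
  | nil =>
    intro pre hl hr
    have h1 : PySem.List.index? pre "l" = none := by
      rw [PySem.List.index?_eq_none_iff]; exact hl
    have h2 : PySem.List.index? pre "r" = none := by
      rw [PySem.List.index?_eq_none_iff]; exact hr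
    simp only [List.append_nil, PySem.List.enumerate_nil, solutionLoop, solution_alt, h1, h2]
    simp
  | cons v rest ih =>
    intro pre hl hr
    rw [PySem.List.enumerate_cons]
    by_cases hvl : v = "l"
    · subst hvl
      cases h : PySem.List.index? (pre ++ "l" :: rest) "r" with
      | none =>
        simp only [solutionLoop, solution_alt, index?_prefix_self pre rest "l" hl, h]
        rw [if_pos trivial, if_pos (by
          have hx : pre.length < (pre ++ "l" :: rest).length := by
            simp only [List.length_append, List.length_cons]; omega
          exact_mod_cast hx)]
      | some k =>
        have hk := index?_gt_of_ne pre rest "l" "r" hr (by decide) k h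
        simp only [solutionLoop, solution_alt, index?_prefix_self pre rest "l" hl, h]
        rw [if_pos trivial, if_pos (by exact_mod_cast hk)]
    · by_cases hvr : v = "r"
      · subst hvr
        have hrule : ∀ li : Int,
            ¬ li < (pre.length : Int) →
            (if li < (pre.length : Int) then
              PySem.List.slice (pre ++ "r" :: rest) none (some li)
            else if (pre.length : Int) < ((pre ++ "r" :: rest).length : Int) then
              PySem.List.slice (pre ++ "r" :: rest) (some ((pre.length : Int) + 1)) none
            else []) =
            PySem.List.slice (pre ++ "r" :: rest) (some ((pre.length : Int) + 1)) none := by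
          intro li hli
          rw [if_neg hli, if_pos (by
            have hx : pre.length < (pre ++ "r" :: rest).length := by
              simp only [List.length_append, List.length_cons]; omega
            exact_mod_cast hx)]
        cases h : PySem.List.index? (pre ++ "r" :: rest) "l" with
        | none =>
          simp only [solutionLoop, solution_alt, index?_prefix_self pre rest "r" hr, h]
          rw [hrule _ (by
            have hx : ¬ (pre ++ "r" :: rest).length < pre.length := by
              simp only [List.length_append, List.length_cons]; omega
            exact_mod_cast hx), if_neg hvl, if_pos trivial]
        | some k =>
          have hk := index?_gt_of_ne pre rest "r" "l" hl (by decide) k h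
          simp only [solutionLoop, solution_alt, index?_prefix_self pre rest "r" hr, h]
          rw [hrule _ (by exact_mod_cast Nat.lt_asymm hk), if_neg hvl, if_pos trivial]
      · simp only [solutionLoop, if_neg hvl, if_neg hvr]
        have hcast : (pre.length : Int) + 1 = (((pre ++ [v]).length : ℕ) : Int) := by
          simp
        have hiha := ih (pre ++ [v])
          (by simp only [List.mem_append, List.mem_singleton]
              rintro (h | h)
              · exact hl h
              · exact hvl h.symm)
          (by simp only [List.mem_append, List.mem_singleton]
              rintro (h | h)
              · exact hr h
              · exact hvr h.symm)
        rw [hcast]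
        simpa using hiha

-- ===== VERDICT (by name: the statement is the Claim_ definition above) =====
theorem solution_spec : Claim_equal_solution := by
  intro str_list _
  unfold Spec_solution solution
  have := loop_eq_alt str_list [] (by simp) (by simp)
  simpa using this
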